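-- pv_equiv track=rewrite | github.com/maxruhdorfer/Test-Time-Compute-For-Reasoning-Models | generate_PRM_data.py | extract_boxed
-- ===== SOURCE A (Python) =====
-- def extract_boxed(answer: str) -> str:
--     """ Extract boxed content in answer while taking into account that due to Latex code there can be additional curly braces
--         Assumes a RAW string as input """
--     box_content = r""
--     i=0
--     while i < len(answer):
--         # find starting point
--         if answer.startswith(r'\boxed{', i):
--             i += len(r'\boxed{')
--             depth = 1
--
--             # loop through the rest of the string and count curly braces
--             while i < len(answer) and depth > 0:
--                 if answer[i] == r"{":
--                     depth += 1
--                 elif answer[i] == r"}":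
--                     depth -= 1
--                 if depth > 0:
--                     box_content += answer[i]
--                 i += 1
--             break
--         else:
--             i += 1
--     return box_content
-- ===== SOURCE B (Python) =====
-- def extract_boxed(answer: str) -> str:
--     k = answer.find('\\boxed{')
--     if k == -1:
--         return ''
--     tail = answer[k + 7:]
--     depth = 1
--     for j, c in enumerate(tail):
--         if c == '{':
--             depth += 1
--         elif c == '}':
--             depth -= 1
--             if depth == 0:
--                 return tail[:j]
--     return tail
-- ===== Notes on version B (the rewrite author's own statement) =====
-- stated objective: faster
-- what changed: Replace the per-index startswith scan with one str.find plus a character-by-character string accumulation replaced by a single depth-counting scan that returns one slice.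
import Mathlib
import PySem

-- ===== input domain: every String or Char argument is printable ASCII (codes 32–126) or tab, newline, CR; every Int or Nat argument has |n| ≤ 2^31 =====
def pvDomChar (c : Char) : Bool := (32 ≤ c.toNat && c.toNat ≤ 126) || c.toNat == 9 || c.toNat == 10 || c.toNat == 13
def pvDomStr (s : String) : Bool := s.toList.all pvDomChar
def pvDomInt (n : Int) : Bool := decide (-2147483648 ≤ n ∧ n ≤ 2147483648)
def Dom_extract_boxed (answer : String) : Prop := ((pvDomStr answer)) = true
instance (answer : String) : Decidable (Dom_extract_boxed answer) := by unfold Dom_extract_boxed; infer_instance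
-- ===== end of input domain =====

-- B replaces A's per-index startswith scan and char-by-char accumulation with one find,
-- one depth-counting scan and one slice (objective: faster, asymptotic in a timing run).

-- ===== PORT A =====
-- inner while loop: counts braces, appends chars while depth > 0
def pvBoxAInner : List Char → Int → List Char → List Char
  | [], _, acc => acc
  | c :: rest, depth, acc =>
    if depth ≤ 0 then acc
    else
      let d := if c = '{' then depth + 1 else if c = '}' then depth - 1 else depth
      pvBoxAInner rest d (if d > 0 then acc ++ [c] else acc)

-- outer while loop: advance i until answer.startswith('\boxed{', i)
def pvBoxAOuter : List Char → List Char
  | [] => []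
  | c :: rest =>
    if ("\\boxed{".toList).isPrefixOf (c :: rest) then
      pvBoxAInner ((c :: rest).drop 7) 1 []
    else pvBoxAOuter rest

def extract_boxed (answer : String) : String := String.ofList (pvBoxAOuter answer.toList)

-- ===== PORT B =====
-- B's for-loop: relative index of the char that closes the box (depth hits 0), none if never
def pvBoxClose : List Char → Int → Option Nat
  | [], _ => none
  | c :: rest, depth =>
    if c = '{' then (pvBoxClose rest (depth + 1)).map (· + 1)
    else if c = '}' then
      if depth - 1 = 0 then some 0
      else (pvBoxClose rest (depth - 1)).map (· + 1)
    else (pvBoxClose rest depth).map (· + 1)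

def extract_boxed_alt (answer : String) : String :=
  let cs := answer.toList
  let k := PySem.Chars.find cs ("\\boxed{".toList)
  if k = -1 then ""
  else
    let tail := cs.drop (k.toNat + 7)
    match pvBoxClose tail 1 with
    | some j => String.ofList (tail.take j)
    | none => String.ofList tail

-- ===== PRECONDITION & SPEC =====
def Spec_extract_boxed (answer : String) (out : String) : Prop := out = extract_boxed_alt answer
instance (answer : String) (out : String) : Decidable (Spec_extract_boxed answer out) := by unfold Spec_extract_boxed; infer_instance

-- ===== CLAIM (what is proved, stated in full; the proofs are below) =====
def Claim_equal_extract_boxed : Prop := ∀ (answer : String), Dom_extract_boxed answer → Spec_extract_boxed answer (extract_boxed answer)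

-- ===== LEMMAS AND PROOFS =====

theorem pvInner_eq_close (cs : List Char) : ∀ (d : Int) (acc : List Char), 0 < d →
    pvBoxAInner cs d acc =
      acc ++ (match pvBoxClose cs d with | some j => cs.take j | none => cs) := by
  induction cs with
  | nil => intro d acc hd; simp [pvBoxAInner, pvBoxClose]
  | cons c rest ih =>
    intro d acc hd
    have h1 : ¬ d ≤ 0 := by omega
    by_cases hc : c = '{'
    · subst hc
      have hd' : (0:Int) < d + 1 := by omega
      have hih := ih (d + 1) (acc ++ ['{']) hd'
      cases h : pvBoxClose rest (d + 1) <;>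
        simp [pvBoxAInner, pvBoxClose, h1, hd', h, hih, List.append_assoc]
    · by_cases hc2 : c = '}'
      · subst hc2
        by_cases hz : d - 1 = 0
        · have hstop : pvBoxAInner rest 0 acc = acc := by
            cases rest <;> simp [pvBoxAInner]
          simp [pvBoxAInner, pvBoxClose, h1, hz, hstop]
        · have hd' : (0:Int) < d - 1 := by omega
          have hd2 : (1:Int) < d := by omega
          have hih := ih (d - 1) (acc ++ ['}']) hd'
          cases h : pvBoxClose rest (d - 1) <;>
            simp [pvBoxAInner, pvBoxClose, h1, hz, hd2, h, hih, List.append_assoc]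
      · have hih := ih d (acc ++ [c]) hd
        cases h : pvBoxClose rest d <;>
          simp [pvBoxAInner, pvBoxClose, hc, hc2, h1, hd, h, hih, List.append_assoc]

theorem pvOuter_no_occ (cs : List Char) (h : ¬ ("\\boxed{".toList) <:+: cs) :
    pvBoxAOuter cs = [] := by
  induction cs with
  | nil => simp [pvBoxAOuter]
  | cons c rest ih =>
    rw [List.infix_cons_iff] at h
    push Not at h
    have hp : ¬ ("\\boxed{".toList).isPrefixOf (c :: rest) = true := by
      rw [List.isPrefixOf_iff_prefix]; exact h.1
    simp only [pvBoxAOuter, if_neg hp]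
    exact ih h.2

theorem pvOuter_occ (cs : List Char) : ∀ (k : Nat),
    ("\\boxed{".toList) <+: cs.drop k →
    (∀ i < k, ¬ ("\\boxed{".toList) <+: cs.drop i) →
    pvBoxAOuter cs = pvBoxAInner (cs.drop (k + 7)) 1 [] := by
  induction cs with
  | nil =>
    intro k hk _
    exfalso
    simp only [List.drop_nil] at hk
    have := hk.length_le
    simp at this
  | cons c rest ih =>
    intro k hk hmin
    cases k with
    | zero =>
      have hp : ("\\boxed{".toList).isPrefixOf (c :: rest) = true := by
        rw [List.isPrefixOf_iff_prefix]; simpa using hk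
      simp only [pvBoxAOuter, if_pos hp]
    | succ j =>
      have h0 : ¬ ("\\boxed{".toList) <+: (c :: rest) := by
        simpa using hmin 0 (Nat.succ_pos j)
      have hp : ¬ ("\\boxed{".toList).isPrefixOf (c :: rest) = true := by
        rw [List.isPrefixOf_iff_prefix]; exact h0
      simp only [pvBoxAOuter, if_neg hp]
      have := ih j (by simpa using hk)
        (fun i hi => by simpa using hmin (i + 1) (by omega))
      simpa using this

-- ===== VERDICT (by name: the statement is the Claim_ definition above) =====
theorem extract_boxed_spec : Claim_equal_extract_boxed := by
  intro answer _
  unfold Spec_extract_boxed extract_boxed extract_boxed_alt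
  set cs := answer.toList with hcs
  set sub := ("\\boxed{".toList) with hsub
  by_cases hk : PySem.Chars.find cs sub = -1
  · rw [if_pos hk]
    have hni : ¬ sub <:+: cs := (PySem.Chars.find_eq_neg_one_iff cs sub).1 hk
    rw [pvOuter_no_occ cs hni]
  · rw [if_neg hk]
    have h0 : 0 ≤ PySem.Chars.find cs sub := by
      have := PySem.Chars.neg_one_le_find cs sub
      omega
    obtain ⟨hpre, hmin⟩ := PySem.Chars.find_spec (s := cs) (sub := sub) h0
    rw [pvOuter_occ cs (PySem.Chars.find cs sub).toNat hpre hmin]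
    rw [pvInner_eq_close _ 1 [] (by omega)]
    cases h : pvBoxClose (cs.drop ((PySem.Chars.find cs sub).toNat + 7)) 1 <;> simp [h]
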